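-- pv_equiv track=rewrite | github.com/francosalvucci14/Appunti-Magistrale | Appunti II Anno/Appunti IR/labs/lab1/lab1_intro.py | proximity_query_two_terms
-- ===== SOURCE A (Python) =====
-- def proximity_query_two_terms(term1, term2, k, positional_index):
--     """
--     Restituisce i docID in cui term1 e term2 compaiono entro distanza k.
--     Implementazione semplice e leggibile, non ancora ottimizzata.
--     """
--     result = []
--
--     postings1 = positional_index.get(term1, {})
--     postings2 = positional_index.get(term2, {})
--
--     common_docs = sorted(set(postings1.keys()) & set(postings2.keys()))
--
--     for doc_id in common_docs:
--         positions1 = postings1[doc_id]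
--         positions2 = postings2[doc_id]
--
--         found = False
--         for p1 in positions1:
--             for p2 in positions2:
--                 if abs(p1 - p2) <= k:
--                     found = True
--                     break
--             if found:
--                 result.append(doc_id)
--                 break
--
--     return result
-- ===== SOURCE B (Python) =====
-- def proximity_query_two_terms(term1, term2, k, positional_index):
--     """Docs where term1 and term2 occur within distance k: iterate term1's
--     postings, check membership in term2's dict, and detect a close pair with a
--     two-pointer sweep over the sorted position lists."""
--     postings1 = positional_index.get(term1, {})
--     postings2 = positional_index.get(term2, {})
--     result = []
--     for doc_id, pos1 in postings1.items():
--         if doc_id not in postings2: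
--             continue
--         a = sorted(pos1)
--         b = sorted(postings2[doc_id])
--         i = j = 0
--         while i < len(a) and j < len(b):
--             if abs(a[i] - b[j]) <= k:
--                 result.append(doc_id)
--                 break
--             if a[i] < b[j]:
--                 i += 1
--             else:
--                 j += 1
--     return sorted(result)
-- ===== Notes on version B (the rewrite author's own statement) =====
-- stated objective: alternative
-- what changed: Replaced the nested all-pairs position scan per document with a two-pointer sweep over the sorted position lists, and replaced the sorted set-intersection of the two key sets with a single pass over term1's postings testing dict membership (sorting the result once at the end).
import Mathlib
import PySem

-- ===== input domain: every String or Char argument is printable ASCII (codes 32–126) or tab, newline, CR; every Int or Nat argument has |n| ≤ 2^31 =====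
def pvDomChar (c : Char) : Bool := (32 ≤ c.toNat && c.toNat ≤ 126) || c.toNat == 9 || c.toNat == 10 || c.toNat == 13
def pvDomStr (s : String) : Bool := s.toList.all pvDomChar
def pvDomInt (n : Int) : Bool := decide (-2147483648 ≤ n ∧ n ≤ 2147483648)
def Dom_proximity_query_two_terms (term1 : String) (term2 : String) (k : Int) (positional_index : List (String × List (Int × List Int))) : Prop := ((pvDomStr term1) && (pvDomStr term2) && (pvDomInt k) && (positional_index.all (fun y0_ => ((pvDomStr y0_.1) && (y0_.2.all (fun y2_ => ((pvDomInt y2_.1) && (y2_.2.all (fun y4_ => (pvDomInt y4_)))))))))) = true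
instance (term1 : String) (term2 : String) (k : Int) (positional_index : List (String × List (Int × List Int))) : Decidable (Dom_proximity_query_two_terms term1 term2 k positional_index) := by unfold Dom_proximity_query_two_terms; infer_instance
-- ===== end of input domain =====

-- B detects a close pair with a two-pointer sweep over the sorted position
-- lists instead of A's nested all-pairs scan, and intersects the postings by a
-- single pass over term1's dict with a membership test instead of A's sorted
-- set intersection (the result is sorted once at the end).

-- ===== PORT A =====
def proximity_query_two_terms (term1 : String) (term2 : String) (k : Int) (positional_index : List (String × List (Int × List Int))) : List Int :=
  let postings1 := PySem.Dict.ofList ((PySem.Dict.ofList positional_index).getD term1 [])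
  let postings2 := PySem.Dict.ofList ((PySem.Dict.ofList positional_index).getD term2 [])
  let common_docs := PySem.List.sorted (PySem.Set.inter (PySem.Set.ofList postings1.keys) (PySem.Set.ofList postings2.keys)) (fun x => x) false
  common_docs.foldl (fun result doc_id =>
    let positions1 := postings1.getD doc_id []
    let positions2 := postings2.getD doc_id []
    -- 'for p1 … for p2 … break' setting found, appending once: List.any is that loop
    if positions1.any (fun p1 => positions2.any (fun p2 => decide (|p1 - p2| ≤ k)))
    then result ++ [doc_id] else result) []

-- ===== PORT B =====
-- the while-loop with two indices of Source B, as structural recursion on the two lists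
def pvTwoPointer (k : Int) : List Int → List Int → Bool
  | [], _ => false
  | _ :: _, [] => false
  | x :: xs, y :: ys =>
    if |x - y| ≤ k then true
    else if x < y then pvTwoPointer k xs (y :: ys)
    else pvTwoPointer k (x :: xs) ys

def proximity_query_two_terms_alt (term1 : String) (term2 : String) (k : Int) (positional_index : List (String × List (Int × List Int))) : List Int :=
  let postings1 := PySem.Dict.ofList ((PySem.Dict.ofList positional_index).getD term1 [])
  let postings2 := PySem.Dict.ofList ((PySem.Dict.ofList positional_index).getD term2 [])
  let result := postings1.items.foldl (fun result pr =>
    if postings2.contains pr.1 then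
      if pvTwoPointer k (PySem.List.sorted pr.2 (fun x => x) false)
                       (PySem.List.sorted (postings2.getD pr.1 []) (fun x => x) false)
      then result ++ [pr.1] else result
    else result) []
  PySem.List.sorted result (fun x => x) false

-- ===== PRECONDITION & SPEC =====
def Spec_proximity_query_two_terms (term1 : String) (term2 : String) (k : Int) (positional_index : List (String × List (Int × List Int))) (out : List Int) : Prop := out = proximity_query_two_terms_alt term1 term2 k positional_index
instance (term1 : String) (term2 : String) (k : Int) (positional_index : List (String × List (Int × List Int))) (out : List Int) : Decidable (Spec_proximity_query_two_terms term1 term2 k positional_index out) := by unfold Spec_proximity_query_two_terms; infer_instance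

-- ===== CLAIM (what is proved, stated in full; the proofs are below) =====
def Claim_equal_proximity_query_two_terms : Prop := ∀ (term1 : String) (term2 : String) (k : Int) (positional_index : List (String × List (Int × List Int))), Dom_proximity_query_two_terms term1 term2 k positional_index → Spec_proximity_query_two_terms term1 term2 k positional_index (proximity_query_two_terms term1 term2 k positional_index)

-- ===== LEMMAS AND PROOFS =====

def pvPred (k : Int) (d1 d2 : PySem.Dict Int (List Int)) (doc : Int) : Bool :=
  (d1.getD doc []).any (fun p1 => (d2.getD doc []).any (fun p2 => decide (|p1 - p2| ≤ k)))

-- the append-if fold is a filter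
theorem pv_foldl_filter_id (g : Int → Bool) (l : List Int) (acc : List Int) :
    l.foldl (fun r x => if g x then r ++ [x] else r) acc = acc ++ l.filter g := by
  induction l generalizing acc with
  | nil => simp
  | cons a t ih =>
    by_cases h : g a = true <;> simp [List.foldl_cons, h, ih]

-- the append-first-component fold is a filter-and-map
theorem pv_foldl_filter_fst (g : Int × List Int → Bool) (l : List (Int × List Int)) (acc : List Int) :
    l.foldl (fun r pr => if g pr then r ++ [pr.1] else r) acc = acc ++ (l.filter g).map (fun pr => pr.1) := by
  induction l generalizing acc with
  | nil => simp
  | cons a t ih =>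
    by_cases h : g a = true <;> simp [List.foldl_cons, h, ih]

-- the two-pointer sweep over sorted lists finds a pair within k iff one exists
theorem pvTwoPointer_iff (k : Int) (x y : List Int) :
    x.Pairwise (· ≤ ·) → y.Pairwise (· ≤ ·) →
    (pvTwoPointer k x y = true ↔ ∃ p ∈ x, ∃ q ∈ y, |p - q| ≤ k) := by
  induction x, y using pvTwoPointer.induct k with
  | case1 y => intro _ _; simp [pvTwoPointer]
  | case2 a t => intro _ _; simp [pvTwoPointer]
  | case3 x xs y ys hcl =>
    intro _ _
    simp only [pvTwoPointer, if_pos hcl]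
    exact iff_of_true trivial ⟨x, List.mem_cons_self, y, List.mem_cons_self, hcl⟩
  | case4 x xs y ys hcl hlt ih =>
    intro hx hy
    rw [List.pairwise_cons] at hx
    simp only [pvTwoPointer, if_neg hcl, if_pos hlt]
    rw [ih hx.2 hy]
    constructor
    · rintro ⟨p, hp, q, hq, h⟩; exact ⟨p, List.mem_cons_of_mem _ hp, q, hq, h⟩
    · rintro ⟨p, hp, q, hq, h⟩
      rcases List.mem_cons.1 hp with rfl | hp'
      · -- p = x: every q ∈ y :: ys has y ≤ q, so |x - q| ≥ |x - y| > k
        exfalso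
        have hyq : y ≤ q := by
          rcases List.mem_cons.1 hq with rfl | hq'
          · exact le_refl q
          · exact (List.pairwise_cons.1 hy).1 q hq'
        rw [abs_le] at h
        have := hcl
        rw [abs_le] at this
        omega
      · exact ⟨p, hp', q, hq, h⟩
  | case5 x xs y ys hcl hlt ih =>
    intro hx hy
    rw [List.pairwise_cons] at hy
    simp only [pvTwoPointer, if_neg hcl, if_neg hlt]
    rw [ih hx hy.2]
    constructor
    · rintro ⟨p, hp, q, hq, h⟩; exact ⟨p, hp, q, List.mem_cons_of_mem _ hq, h⟩
    · rintro ⟨p, hp, q, hq, h⟩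
      rcases List.mem_cons.1 hq with rfl | hq'
      · -- q = y: every p ∈ x :: xs has x ≤ p, so |p - y| ≥ |x - y| > k
        exfalso
        have hxp : x ≤ p := by
          rcases List.mem_cons.1 hp with rfl | hp'
          · exact le_refl p
          · exact (List.pairwise_cons.1 hx).1 p hp'
        rw [abs_le] at h
        have := hcl
        rw [abs_le] at this
        omega
      · exact ⟨p, hp, q, hq', h⟩

-- per document, B's test equals A's nested any
theorem pv_tp_eq_pred (k : Int) (a b : List Int) :
    pvTwoPointer k (PySem.List.sorted a (fun x => x) false) (PySem.List.sorted b (fun x => x) false)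
      = a.any (fun p => b.any (fun q => decide (|p - q| ≤ k))) := by
  have hx : (PySem.List.sorted a (fun x => x) false).Pairwise (· ≤ ·) := by
    have := PySem.List.sorted_pairwise a (fun x => x)
    simpa using this
  have hy : (PySem.List.sorted b (fun x => x) false).Pairwise (· ≤ ·) := by
    have := PySem.List.sorted_pairwise b (fun x => x)
    simpa using this
  rw [Bool.eq_iff_iff, pvTwoPointer_iff k _ _ hx hy, List.any_eq_true]
  constructor
  · rintro ⟨p, hp, q, hq, h⟩
    exact ⟨p, (PySem.List.mem_sorted a (fun x => x) false p).1 hp,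
      List.any_eq_true.2 ⟨q, (PySem.List.mem_sorted b (fun x => x) false q).1 hq, by simpa using h⟩⟩
  · rintro ⟨p, hp, hb⟩
    rcases List.any_eq_true.1 hb with ⟨q, hq, h⟩
    exact ⟨p, (PySem.List.mem_sorted a (fun x => x) false p).2 hp, q,
      (PySem.List.mem_sorted b (fun x => x) false q).2 hq, by simpa using h⟩

theorem proximity_eq (term1 term2 : String) (k : Int) (positional_index : List (String × List (Int × List Int))) :
    proximity_query_two_terms term1 term2 k positional_index = proximity_query_two_terms_alt term1 term2 k positional_index := by
  unfold proximity_query_two_terms proximity_query_two_terms_alt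
  dsimp only []
  set d1 := PySem.Dict.ofList ((PySem.Dict.ofList positional_index).getD term1 []) with hd1
  set d2 := PySem.Dict.ofList ((PySem.Dict.ofList positional_index).getD term2 []) with hd2
  have hnd1 : d1.keys.Nodup := PySem.Dict.nodup_keys_ofList _
  have hnd2 : d2.keys.Nodup := PySem.Dict.nodup_keys_ofList _
  set S : List Int := PySem.Set.inter (PySem.Set.ofList d1.keys) (PySem.Set.ofList d2.keys) with hS
  -- A's fold is a filter over the sorted intersection
  rw [pv_foldl_filter_id (fun doc_id => (d1.getD doc_id []).any (fun p1 => (d2.getD doc_id []).any (fun p2 => decide (|p1 - p2| ≤ k)))) (PySem.List.sorted S (fun x => x) false) []]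
  -- B's fold is a filter-and-map over the items
  rw [show (fun (result : List Int) (pr : Int × List Int) =>
      if d2.contains pr.1 = true then
        if pvTwoPointer k (PySem.List.sorted pr.2 (fun x => x) false) (PySem.List.sorted (d2.getD pr.1 []) (fun x => x) false) = true
        then result ++ [pr.1] else result
      else result)
      = (fun (result : List Int) (pr : Int × List Int) =>
        if (d2.contains pr.1 && pvTwoPointer k (PySem.List.sorted pr.2 (fun x => x) false) (PySem.List.sorted (d2.getD pr.1 []) (fun x => x) false))
        then result ++ [pr.1] else result) from by
        funext r pr; by_cases h : d2.contains pr.1 = true <;> simp [h]]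
  rw [pv_foldl_filter_fst (fun pr => d2.contains pr.1 && pvTwoPointer k (PySem.List.sorted pr.2 (fun x => x) false) (PySem.List.sorted (d2.getD pr.1 []) (fun x => x) false)) d1.items []]
  simp only [List.nil_append]
  -- rewrite B's per-item test to the shared predicate pvPred
  have hfilt : d1.items.filter (fun pr => d2.contains pr.1 && pvTwoPointer k (PySem.List.sorted pr.2 (fun x => x) false) (PySem.List.sorted (d2.getD pr.1 []) (fun x => x) false))
      = d1.items.filter (fun pr => d2.contains pr.1 && pvPred k d1 d2 pr.1) := by
    apply List.filter_congr
    intro pr hpr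
    have hget : d1.getD pr.1 [] = pr.2 := by
      rcases pr with ⟨a, b⟩
      exact PySem.Dict.getD_of_mem_items _ hpr hnd1 []
    rw [pv_tp_eq_pred, pvPred, hget]
  rw [hfilt]
  set LB : List Int := (d1.items.filter (fun pr => d2.contains pr.1 && pvPred k d1 d2 pr.1)).map (fun pr => pr.1) with hLB
  have hSnd : S.Nodup := PySem.Set.nodup_inter _ _ (PySem.Set.nodup_ofList _)
  have hsortnd : (PySem.List.sorted S (fun x => x) false).Nodup :=
    (PySem.List.sorted_perm S (fun x => x) false).nodup_iff.2 hSnd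
  have hpair : ((PySem.List.sorted S (fun x => x) false).filter (fun doc_id => (d1.getD doc_id []).any (fun p1 => (d2.getD doc_id []).any (fun p2 => decide (|p1 - p2| ≤ k))))).Pairwise (· < ·) := by
    apply List.Pairwise.filter
    have h1 : (PySem.List.sorted S (fun x => x) false).Pairwise (· ≤ ·) := by
      have := PySem.List.sorted_pairwise S (fun x => x)
      simpa using this
    have h2 : (PySem.List.sorted S (fun x => x) false).Pairwise (· ≠ ·) := hsortnd
    exact (h1.and h2).imp (fun h => lt_of_le_of_ne h.1 h.2)
  have hkeys1 : (d1.items.map (fun pr => pr.1)).Nodup := hnd1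
  have hLBnd : LB.Nodup := by
    have hsub : LB.Sublist (d1.items.map (fun pr => pr.1)) := List.Sublist.map (fun pr : Int × List Int => pr.1) List.filter_sublist
    exact hkeys1.sublist hsub
  have hAnd : ((PySem.List.sorted S (fun x => x) false).filter (fun doc_id => (d1.getD doc_id []).any (fun p1 => (d2.getD doc_id []).any (fun p2 => decide (|p1 - p2| ≤ k))))).Nodup :=
    hsortnd.filter _
  have hmem : ∀ z : Int, z ∈ (PySem.List.sorted S (fun x => x) false).filter (fun doc_id => (d1.getD doc_id []).any (fun p1 => (d2.getD doc_id []).any (fun p2 => decide (|p1 - p2| ≤ k)))) ↔ z ∈ LB := by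
    intro z
    rw [List.mem_filter, PySem.List.mem_sorted, hS, PySem.Set.mem_inter, PySem.Set.mem_ofList, PySem.Set.mem_ofList]
    rw [hLB]
    simp only [List.mem_map, List.mem_filter, Bool.and_eq_true]
    constructor
    · rintro ⟨⟨h1, h2⟩, hpz⟩
      have hmem1 : z ∈ d1.items.map (fun pr => pr.1) := h1
      rcases List.mem_map.1 hmem1 with ⟨pr, hpr, rfl⟩
      exact ⟨pr, ⟨hpr, (PySem.Dict.contains_iff_mem_keys _ _).2 h2, hpz⟩, rfl⟩
    · rintro ⟨pr, ⟨hpr, hc, hpz⟩, rfl⟩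
      refine ⟨⟨?_, (PySem.Dict.contains_iff_mem_keys _ _).1 hc⟩, hpz⟩
      exact List.mem_map.2 ⟨pr, hpr, rfl⟩
  have hperm : ((PySem.List.sorted S (fun x => x) false).filter (fun doc_id => (d1.getD doc_id []).any (fun p1 => (d2.getD doc_id []).any (fun p2 => decide (|p1 - p2| ≤ k))))).Perm LB :=
    (List.perm_ext_iff_of_nodup hAnd hLBnd).2 hmem
  exact (PySem.List.sorted_eq_of_perm_of_pairwise_lt _ _ _ hperm hpair).symm

-- ===== VERDICT (by name: the statement is the Claim_ definition above) =====
theorem proximity_query_two_terms_spec : Claim_equal_proximity_query_two_terms := by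
  intro term1 term2 k positional_index _
  unfold Spec_proximity_query_two_terms
  exact proximity_eq term1 term2 k positional_index
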